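-- pv_equiv track=rewrite | github.com/BaranovN/multiagent-coder | src/mac/agents.py | _infer_run_command
-- ===== SOURCE A (Python) =====
-- def _infer_run_command(files: list[dict[str, str]], language: str | None) -> str:
--     """Best-effort run command for common languages so the Tester still has
--     something to execute when the model forgets to specify one."""
--     paths = [f.get("path", "") for f in files]
--     lang = (language or "").lower()
--     if lang.startswith("python") or any(p.endswith(".py") for p in paths):
--         main = next((p for p in paths if p.endswith(".py")), "main.py")
--         return f"python {main}"
--     if lang in ("javascript", "typescript", "node") or any(
--         p.endswith((".js", ".mjs")) for p in paths
--     ):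
--         main = next((p for p in paths if p.endswith((".js", ".mjs"))), "main.js")
--         return f"node {main}"
--     if lang == "go" or any(p.endswith(".go") for p in paths):
--         return "go run ."
--     if lang == "rust" or any(p.endswith(".rs") for p in paths):
--         return "cargo run --release -q"
--     return "bash run.sh"
-- ===== SOURCE B (Python) =====
-- def _infer_run_command(files: list[dict[str, str]], language: str | None) -> str:
--     # One pass over the files builds a small index (first .py path, first
--     # .js/.mjs path, has-.go, has-.rs); the ordered language decision then
--     # reads the index instead of re-scanning the paths in every branch.
--     first_py = None
--     first_js = None
--     has_go = False
--     has_rs = False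
--     for f in files:
--         p = f.get("path", "")
--         if first_py is None and p.endswith(".py"):
--             first_py = p
--         if first_js is None and p.endswith((".js", ".mjs")):
--             first_js = p
--         if p.endswith(".go"):
--             has_go = True
--         if p.endswith(".rs"):
--             has_rs = True
--     lang = (language or "").lower()
--     if lang.startswith("python") or first_py is not None:
--         return f"python {first_py if first_py is not None else 'main.py'}"
--     if lang in ("javascript", "typescript", "node") or first_js is not None:
--         return f"node {first_js if first_js is not None else 'main.js'}"
--     if lang == "go" or has_go:
--         return "go run ."
--     if lang == "rust" or has_rs:
--         return "cargo run --release -q"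
--     return "bash run.sh"
-- ===== Notes on version B (the rewrite author's own statement) =====
-- stated objective: simpler
-- what changed: A rescans the path list in every branch (any/next generator scans); B builds a four-field index (first .py, first .js/.mjs, has .go, has .rs) in one pass over files and the branch chain only reads it.
import Mathlib
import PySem

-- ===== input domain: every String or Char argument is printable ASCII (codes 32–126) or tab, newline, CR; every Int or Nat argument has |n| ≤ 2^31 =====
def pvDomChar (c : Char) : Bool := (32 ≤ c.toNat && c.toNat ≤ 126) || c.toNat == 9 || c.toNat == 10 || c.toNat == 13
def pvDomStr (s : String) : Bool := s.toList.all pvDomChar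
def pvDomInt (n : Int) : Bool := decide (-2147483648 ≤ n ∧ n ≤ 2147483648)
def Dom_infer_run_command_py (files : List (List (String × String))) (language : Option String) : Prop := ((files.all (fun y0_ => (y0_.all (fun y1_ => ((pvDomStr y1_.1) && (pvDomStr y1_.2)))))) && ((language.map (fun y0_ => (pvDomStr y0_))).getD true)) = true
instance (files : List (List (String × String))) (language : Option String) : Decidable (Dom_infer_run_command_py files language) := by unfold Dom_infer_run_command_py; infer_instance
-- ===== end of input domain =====

-- B replaces A's per-branch rescans of the path list (any/next) by one pass over the
-- files that builds a four-field index, read by the same ordered branch chain (simpler).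

-- ===== PORT A =====
def infer_run_command_py (files : List (List (String × String))) (language : Option String) : String :=
  let paths := files.map (fun f => PySem.Dict.getD ⟨f⟩ "path" "")
  let lang := PySem.Str.lower (language.getD "")
  if PySem.Str.startswith lang "python" || paths.any (fun p => PySem.Str.endswith p ".py") then
    let main := (paths.find? (fun p => PySem.Str.endswith p ".py")).getD "main.py"
    "python " ++ main
  else if (lang == "javascript" || lang == "typescript" || lang == "node")
      || paths.any (fun p => PySem.Str.endswith p ".js" || PySem.Str.endswith p ".mjs") then
    let main := (paths.find? (fun p => PySem.Str.endswith p ".js" || PySem.Str.endswith p ".mjs")).getD "main.js"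
    "node " ++ main
  else if lang == "go" || paths.any (fun p => PySem.Str.endswith p ".go") then
    "go run ."
  else if lang == "rust" || paths.any (fun p => PySem.Str.endswith p ".rs") then
    "cargo run --release -q"
  else
    "bash run.sh"

-- ===== PORT B =====
-- B's one-pass loop: state = (first_py, first_js, has_go, has_rs)
def inferRunIndex : List (List (String × String)) →
    Option String × Option String × Bool × Bool → Option String × Option String × Bool × Bool
  | [], st => st
  | f :: rest, (firstPy, firstJs, hasGo, hasRs) =>
    let p := PySem.Dict.getD (⟨f⟩ : PySem.Dict String String) "path" ""
    let firstPy := if firstPy.isNone && PySem.Str.endswith p ".py" then some p else firstPy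
    let firstJs := if firstJs.isNone && (PySem.Str.endswith p ".js" || PySem.Str.endswith p ".mjs")
                   then some p else firstJs
    let hasGo := if PySem.Str.endswith p ".go" then true else hasGo
    let hasRs := if PySem.Str.endswith p ".rs" then true else hasRs
    inferRunIndex rest (firstPy, firstJs, hasGo, hasRs)

def infer_run_command_py_alt (files : List (List (String × String))) (language : Option String) : String :=
  let (firstPy, firstJs, hasGo, hasRs) := inferRunIndex files (none, none, false, false)
  let lang := PySem.Str.lower (language.getD "")
  if PySem.Str.startswith lang "python" || firstPy.isSome then
    "python " ++ firstPy.getD "main.py"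
  else if (lang == "javascript" || lang == "typescript" || lang == "node") || firstJs.isSome then
    "node " ++ firstJs.getD "main.js"
  else if lang == "go" || hasGo then
    "go run ."
  else if lang == "rust" || hasRs then
    "cargo run --release -q"
  else
    "bash run.sh"

-- ===== PRECONDITION & SPEC =====
def Spec_infer_run_command_py (files : List (List (String × String))) (language : Option String) (out : String) : Prop := out = infer_run_command_py_alt files language
instance (files : List (List (String × String))) (language : Option String) (out : String) : Decidable (Spec_infer_run_command_py files language out) := by unfold Spec_infer_run_command_py; infer_instance

-- ===== CLAIM (what is proved, stated in full; the proofs are below) =====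
def Claim_equal_infer_run_command_py : Prop := ∀ (files : List (List (String × String))) (language : Option String), Dom_infer_run_command_py files language → Spec_infer_run_command_py files language (infer_run_command_py files language)

-- ===== LEMMAS AND PROOFS =====

-- The one-pass index computes exactly (find? .py, find? .js/.mjs, any .go, any .rs) over the paths.
theorem inferRunIndex_spec (files : List (List (String × String)))
    (fp fj : Option String) (hg hr : Bool) :
    inferRunIndex files (fp, fj, hg, hr) =
      (let paths := files.map (fun f => PySem.Dict.getD ⟨f⟩ "path" "");
       ((if fp.isSome then fp else paths.find? (fun p => PySem.Str.endswith p ".py")),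
        (if fj.isSome then fj else paths.find? (fun p => PySem.Str.endswith p ".js" || PySem.Str.endswith p ".mjs")),
        (hg || paths.any (fun p => PySem.Str.endswith p ".go")),
        (hr || paths.any (fun p => PySem.Str.endswith p ".rs")))) := by
  induction files generalizing fp fj hg hr with
  | nil => cases fp <;> cases fj <;> simp [inferRunIndex]
  | cons f rest ih =>
    simp only [inferRunIndex, List.map_cons, List.find?_cons, List.any_cons]
    rw [ih]
    set p := PySem.Dict.getD (⟨f⟩ : PySem.Dict String String) "path" "" with hp
    clear hp ih
    cases fp <;> cases fj <;>
      cases h1 : PySem.Str.endswith p ".py" <;>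
      cases h2 : PySem.Str.endswith p ".js" <;>
      cases h2' : PySem.Str.endswith p ".mjs" <;>
      cases h3 : PySem.Str.endswith p ".go" <;>
      cases h4 : PySem.Str.endswith p ".rs" <;>
      simp

theorem find_isSome_eq_any (paths : List String) (q : String → Bool) :
    (paths.find? q).isSome = paths.any q := by
  induction paths with
  | nil => simp
  | cons p rest ih => by_cases h : q p <;> simp [h, ih]

-- ===== VERDICT (by name: the statement is the Claim_ definition above) =====
theorem infer_run_command_py_spec : Claim_equal_infer_run_command_py := by
  intro files language _
  unfold Spec_infer_run_command_py infer_run_command_py infer_run_command_py_alt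
  rw [inferRunIndex_spec]
  simp only [Option.isSome_none, Bool.false_eq_true, if_false, Bool.false_or,
    find_isSome_eq_any]
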